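-- pv_equiv track=rewrite | github.com/maread99/market_prices | src/market_prices/prices/csv.py | _get_symbol_from_filename
-- ===== SOURCE A (Python) =====
-- def _get_symbol_from_filename(name: str, symbols: list[str]) -> str | None:
--     """Return symbol indentified in filename, or None if indiscernible.
--
--     Parameters
--     ----------
--     name
--         Name of csv file, excluding any extension.
--
--     symbols
--         List of valid symbols.
--     """
--     parts = name.split("_")
--     symbol = ""
--     for part in parts:
--         if part not in symbols:
--             continue
--         if symbol and symbol != part:
--             # at least two different symbols in filename
--             return None
--         symbol = part
--     return symbol if symbol else None
-- ===== SOURCE B (Python) =====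
-- def _get_symbol_from_filename(name: str, symbols: list[str]) -> str | None:
--     """Return symbol identified in filename, or None if indiscernible."""
--     parts = set(name.split("_"))
--     found = None
--     for s in symbols:
--         if s in parts and s != found:
--             if found is not None:
--                 # at least two different valid symbols in filename
--                 return None
--             found = s
--     return found or None
-- ===== Notes on version B (the rewrite author's own statement) =====
-- stated objective: alternative
-- what changed: Inverts the traversal: instead of scanning the filename parts and testing each against the symbol list, B builds the set of parts once and scans the SYMBOL list, keeping the first symbol found among the parts and early-exiting when a second distinct symbol is present (correct because the unique valid part equals the unique symbol occurring among the parts).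
-- outside the precondition, e.g. on _get_symbol_from_filename('_X', ['', 'X']): A returns 'X', B returns None; on _get_symbol_from_filename('X_', ['', 'X']): A returns None, B returns None
import Mathlib
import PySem

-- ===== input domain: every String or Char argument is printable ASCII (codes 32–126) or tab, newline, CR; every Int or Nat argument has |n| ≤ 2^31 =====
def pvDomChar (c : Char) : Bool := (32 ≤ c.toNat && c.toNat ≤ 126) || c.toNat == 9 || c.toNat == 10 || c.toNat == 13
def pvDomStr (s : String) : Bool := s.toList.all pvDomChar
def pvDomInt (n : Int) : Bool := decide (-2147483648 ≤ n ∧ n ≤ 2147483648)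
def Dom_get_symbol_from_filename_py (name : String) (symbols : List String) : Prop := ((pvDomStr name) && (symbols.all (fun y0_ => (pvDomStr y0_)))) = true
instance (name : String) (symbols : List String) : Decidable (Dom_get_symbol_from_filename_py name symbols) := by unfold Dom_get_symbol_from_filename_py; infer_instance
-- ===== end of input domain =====

-- B inverts the traversal: it scans the SYMBOL list against a set of the filename's parts,
-- instead of scanning the parts against the symbol list (objective: alternative; return value only).

-- ===== PORT A =====
-- A's for-loop over parts, running variable `symbol` (initially ""), early `return None`.
def pvGoA (symbols : List String) : List String → String → Option String
  | [], symbol => if symbol ≠ "" then some symbol else none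
  | p :: rest, symbol =>
      if ¬ (p ∈ symbols) then pvGoA symbols rest symbol
      else if symbol ≠ "" ∧ symbol ≠ p then none
      else pvGoA symbols rest p

def get_symbol_from_filename_py (name : String) (symbols : List String) : Option String :=
  let parts := (PySem.Str.split? name "_").getD []   -- name.split("_"); sep "_" ≠ "", so split? is some
  pvGoA symbols parts ""

-- ===== PORT B =====
-- B's for-loop over symbols, running Optional `found`, early `return None`; final `found or None`.
def pvGoB (parts : PySem.Set String) : List String → Option String → Option String
  | [], found =>
      match found with                               -- return found or None
      | some s => if s ≠ "" then some s else none
      | none => none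
  | s :: rest, found =>
      if PySem.Set.contains parts s ∧ found ≠ some s then   -- if s in parts and s != found
        match found with
        | some _ => none                             -- if found is not None: return None
        | none => pvGoB parts rest (some s)          -- found = s
      else pvGoB parts rest found

def get_symbol_from_filename_py_alt (name : String) (symbols : List String) : Option String :=
  let parts := PySem.Set.ofList ((PySem.Str.split? name "_").getD [])  -- set(name.split("_"))
  pvGoB parts symbols none

-- ===== PRECONDITION & SPEC =====
-- Pre_ excludes inputs on which the empty string is a valid symbol and occurs among the
-- filename's parts: there A's falsy running variable `symbol` makes the result an accident of
-- the implementation (an empty valid part can silently reset the scan), a corner no caller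
-- would specify; B treats "" like any other symbol there.
def Pre_get_symbol_from_filename_py (name : String) (symbols : List String) : Prop :=
  ¬ ("" ∈ symbols ∧ "" ∈ (PySem.Str.split? name "_").getD [])
instance (name : String) (symbols : List String) : Decidable (Pre_get_symbol_from_filename_py name symbols) := by unfold Pre_get_symbol_from_filename_py; infer_instance

def pvWitness_get_symbol_from_filename_py : String × List String := ("MSFT_20200101", ["MSFT", "AAPL"])

def Spec_get_symbol_from_filename_py (name : String) (symbols : List String) (out : Option String) : Prop := out = get_symbol_from_filename_py_alt name symbols
instance (name : String) (symbols : List String) (out : Option String) : Decidable (Spec_get_symbol_from_filename_py name symbols out) := by unfold Spec_get_symbol_from_filename_py; infer_instance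

-- ===== CLAIM (what is proved, stated in full; the proofs are below) =====
def Claim_equal_get_symbol_from_filename_py : Prop := ∀ (name : String) (symbols : List String), Dom_get_symbol_from_filename_py name symbols → Pre_get_symbol_from_filename_py name symbols → Spec_get_symbol_from_filename_py name symbols (get_symbol_from_filename_py name symbols)

-- ===== LEMMAS AND PROOFS =====

-- The unique element of a nonempty all-equal list, else none.
def pvUniq : List String → Option String
  | [] => none
  | p :: rest => if rest.all (· == p) then some p else none

theorem pvUniq_eq_some_iff (l : List String) (x : String) :
    pvUniq l = some x ↔ (x ∈ l ∧ ∀ p ∈ l, p = x) := by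
  cases l with
  | nil => simp [pvUniq]
  | cons p rest =>
      have hall_iff : (rest.all (· == p)) = true ↔ ∀ q ∈ rest, q = p := by simp
      simp only [pvUniq]
      by_cases hall : (rest.all (· == p)) = true
      · rw [if_pos hall]
        constructor
        · intro h
          have hpx : p = x := Option.some.inj h
          subst hpx
          refine ⟨List.mem_cons_self, ?_⟩
          intro q hq
          rcases List.mem_cons.mp hq with e | hq'
          · exact e
          · exact hall_iff.mp hall q hq'
        · rintro ⟨_, ha⟩
          exact congrArg some (ha p List.mem_cons_self)
      · rw [if_neg hall]
        constructor
        · intro h; cases h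
        · rintro ⟨_, ha⟩
          exact absurd (hall_iff.mpr fun q hq =>
            (ha q (List.mem_cons_of_mem _ hq)).trans (ha p List.mem_cons_self).symm) hall

-- pvUniq depends only on the SET of elements.
theorem pvUniq_ext (l1 l2 : List String) (h : ∀ x, x ∈ l1 ↔ x ∈ l2) :
    pvUniq l1 = pvUniq l2 := by
  cases h1 : pvUniq l1 with
  | some x =>
      rcases (pvUniq_eq_some_iff l1 x).mp h1 with ⟨hm, ha⟩
      exact ((pvUniq_eq_some_iff l2 x).mpr ⟨(h x).mp hm, fun p hp => ha p ((h p).mpr hp)⟩).symm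
  | none =>
      cases h2 : pvUniq l2 with
      | none => rfl
      | some y =>
          rcases (pvUniq_eq_some_iff l2 y).mp h2 with ⟨hm, ha⟩
          have := (pvUniq_eq_some_iff l1 y).mpr ⟨(h y).mpr hm, fun p hp => ha p ((h p).mp hp)⟩
          rw [h1] at this; cases this

-- A's loop from a nonempty running symbol s: succeeds iff every remaining valid part equals s.
theorem pvGoA_ne (symbols : List String) (parts : List String) (s : String) (hs : s ≠ "") :
    pvGoA symbols parts s =
      if (parts.filter (· ∈ symbols)).all (· == s) then some s else none := by
  induction parts generalizing s with
  | nil => simp [pvGoA, hs]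
  | cons p rest ih =>
      by_cases hp : p ∈ symbols
      · by_cases hps : s = p
        · subst hps
          simp [pvGoA, hp, ih s hs]
        · have hdiff : ¬ (p == s) = true := fun h => hps (beq_iff_eq.mp h).symm
          simp [pvGoA, hp, hs, hps, hdiff]
      · simp [pvGoA, hp, ih s hs]

-- A's loop from the empty sentinel, when no valid part is empty, computes pvUniq of the valid parts.
theorem pvGoA_empty (symbols : List String) (parts : List String)
    (h : ∀ p ∈ parts.filter (· ∈ symbols), p ≠ "") :
    pvGoA symbols parts "" = pvUniq (parts.filter (· ∈ symbols)) := by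
  induction parts with
  | nil => simp [pvGoA, pvUniq]
  | cons p rest ih =>
      by_cases hp : p ∈ symbols
      · have hpne : p ≠ "" := h p (by simp [hp])
        simp [pvGoA, hp, pvUniq, pvGoA_ne symbols rest p hpne]
      · have h' : ∀ q ∈ rest.filter (· ∈ symbols), q ≠ "" := by
          intro q hq
          exact h q (by simp [hp]; simpa using hq)
        simp [pvGoA, hp, ih h']

-- B's loop holding `found = some f`: succeeds iff every remaining matching symbol equals f.
theorem pvGoB_some (pset : PySem.Set String) (syms : List String) (f : String) :
    pvGoB pset syms (some f) =
      if (syms.filter (fun s => PySem.Set.contains pset s)).all (· == f)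
      then (if f ≠ "" then some f else none) else none := by
  induction syms with
  | nil => simp [pvGoB]
  | cons s rest ih =>
      by_cases hc : s ∈ pset
      · by_cases hsf : s = f
        · subst hsf
          simp [pvGoB, hc, ih]
        · have hsf' : ¬ f = s := fun e => hsf e.symm
          simp [pvGoB, hc, hsf, hsf']
      · simp [pvGoB, hc, ih]

-- The empty-string-guarded unique of a list (B's terminal `found or None` folded in).
def pvUniq' : List String → Option String
  | [] => none
  | m :: rest => if rest.all (· == m) then (if m ≠ "" then some m else none) else none

-- B's loop from None computes pvUniq' of the matching symbols.
theorem pvGoB_none (pset : PySem.Set String) (syms : List String) :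
    pvGoB pset syms none = pvUniq' (syms.filter (fun s => PySem.Set.contains pset s)) := by
  induction syms with
  | nil => simp [pvGoB, pvUniq']
  | cons s rest ih =>
      by_cases hc : s ∈ pset
      · simp [pvGoB, hc, pvUniq', pvGoB_some]
      · simp [pvGoB, hc, ih]

theorem pvUniq'_eq_pvUniq (l : List String) (h : ∀ p ∈ l, p ≠ "") :
    pvUniq' l = pvUniq l := by
  cases l with
  | nil => rfl
  | cons m rest => simp [pvUniq', pvUniq, h m List.mem_cons_self]

-- ===== VERDICT (by name: the statement is the Claim_ definition above) =====
theorem get_symbol_from_filename_py_spec : Claim_equal_get_symbol_from_filename_py := by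
  intro name symbols _ hpre
  unfold Spec_get_symbol_from_filename_py get_symbol_from_filename_py get_symbol_from_filename_py_alt
  simp only
  set P : List String := (PySem.Str.split? name "_").getD [] with hP
  have hmemPset : ∀ x, PySem.Set.contains (PySem.Set.ofList P) x = true ↔ x ∈ P := by
    intro x
    rw [PySem.Set.contains_iff, PySem.Set.mem_ofList]
  have hM : ∀ x, x ∈ symbols.filter (fun s => PySem.Set.contains (PySem.Set.ofList P) s)
      ↔ x ∈ P.filter (· ∈ symbols) := by
    intro x
    simp only [List.mem_filter, decide_eq_true_eq, hmemPset]
    tauto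
  have hFne : ∀ p ∈ P.filter (· ∈ symbols), p ≠ "" := by
    intro p hp he
    rcases List.mem_filter.mp hp with ⟨hmem, hval⟩
    exact hpre ⟨by rw [← he]; simpa using hval, he ▸ hmem⟩
  have hMne : ∀ p ∈ symbols.filter (fun s => PySem.Set.contains (PySem.Set.ofList P) s), p ≠ "" :=
    fun p hp => hFne p ((hM p).mp hp)
  rw [pvGoA_empty symbols P hFne, pvGoB_none, pvUniq'_eq_pvUniq _ hMne]
  exact (pvUniq_ext _ _ (fun x => (hM x))).symm
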